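-- pv_equiv track=rewrite | github.com/rqwangXD/cit582 | hash_collision.py | last_k_bits_match
-- ===== SOURCE A (Python) =====
-- def last_k_bits_match(x_value, y_value, k):
--     if k == 0:
--         return True
--     mask = 0
--     for i in range(k):
--         mask = mask << 1
--         mask |= 1
--     masked_x = x_value & mask
--     masked_y = y_value & mask
--
--     return masked_x == masked_y
-- ===== SOURCE B (Python) =====
-- def last_k_bits_match(x_value, y_value, k):
--     if k <= 0:
--         return True
--     return (x_value - y_value) % (1 << k) == 0
-- ===== Notes on version B (the rewrite author's own statement) =====
-- stated objective: faster
-- what changed: Replaces the k-step mask-building loop and two bitwise AND maskings with a single modular-arithmetic test (x - y) % 2^k == 0, using the identity x & ((1<<k)-1) == x % (1<<k) for all Python ints.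
import Mathlib
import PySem

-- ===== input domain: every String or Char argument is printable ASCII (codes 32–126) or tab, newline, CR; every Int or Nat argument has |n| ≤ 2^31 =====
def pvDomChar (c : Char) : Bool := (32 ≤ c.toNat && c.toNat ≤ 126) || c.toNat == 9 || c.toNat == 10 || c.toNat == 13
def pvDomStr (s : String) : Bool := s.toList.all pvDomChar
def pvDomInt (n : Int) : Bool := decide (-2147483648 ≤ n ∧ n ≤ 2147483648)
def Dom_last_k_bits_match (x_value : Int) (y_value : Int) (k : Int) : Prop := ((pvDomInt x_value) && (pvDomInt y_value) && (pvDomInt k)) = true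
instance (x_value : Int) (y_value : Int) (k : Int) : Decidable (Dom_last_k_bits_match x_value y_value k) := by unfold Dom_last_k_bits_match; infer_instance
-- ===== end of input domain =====

-- B replaces A's k-step mask-building loop and bitwise masking by the single modular test
-- (x - y) % 2^k == 0 (measurably faster for large k).

-- ===== PORT A =====
def last_k_bits_match (x_value : Int) (y_value : Int) (k : Int) : Bool :=
  if k == 0 then true
  else
    let mask := (PySem.List.pyRange 0 k 1).foldl
      (fun mask _ => PySem.Int.bor (mask <<< (1 : Nat)) 1) 0
    let masked_x := PySem.Int.band x_value mask
    let masked_y := PySem.Int.band y_value mask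
    masked_x == masked_y

-- ===== PORT B =====
def last_k_bits_match_alt (x_value : Int) (y_value : Int) (k : Int) : Bool :=
  if k ≤ 0 then true
  else PySem.Int.mod (x_value - y_value) ((1 : Int) <<< k.toNat) == 0

-- ===== PRECONDITION & SPEC =====
def Spec_last_k_bits_match (x_value : Int) (y_value : Int) (k : Int) (out : Bool) : Prop := out = last_k_bits_match_alt x_value y_value k
instance (x_value : Int) (y_value : Int) (k : Int) (out : Bool) : Decidable (Spec_last_k_bits_match x_value y_value k out) := by unfold Spec_last_k_bits_match; infer_instance

-- ===== CLAIM (what is proved, stated in full; the proofs are below) =====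
def Claim_equal_last_k_bits_match : Prop := ∀ (x_value : Int) (y_value : Int) (k : Int), Dom_last_k_bits_match x_value y_value k → Spec_last_k_bits_match x_value y_value k (last_k_bits_match x_value y_value k)

-- ===== LEMMAS AND PROOFS =====

theorem pv_or_one (m : Nat) : 2 * m ||| 1 = 2 * m + 1 := by
  apply Nat.eq_of_testBit_eq
  intro i
  cases i with
  | zero => simp [Nat.mul_comm, Nat.testBit_zero]
  | succ j =>
    rw [Nat.testBit_or, Nat.testBit_succ, Nat.testBit_succ, Nat.testBit_succ]
    have h1 : 2 * m / 2 = m := by omega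
    have h2 : (2 * m + 1) / 2 = m := by omega
    have h3 : (1 : Nat) / 2 = 0 := by omega
    rw [h1, h2, h3]
    simp

-- the loop builds the mask 2^n - 1
theorem pv_mask_eq (n : Nat) :
    (PySem.List.pyRange 0 (n : Int) 1).foldl
      (fun mask _ => PySem.Int.bor (mask <<< (1 : Nat)) 1) 0 = 2 ^ n - 1 := by
  induction n with
  | zero => decide
  | succ m ih =>
    have hseg : PySem.List.pyRange (m : Int) ((m : Int) + 1) = [(m : Int)] := by
      rw [PySem.List.pyRange_one_cons (by omega), PySem.List.pyRange_one_eq_nil (by omega)]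
    rw [show ((m + 1 : Nat) : Int) = (m : Int) + 1 by push_cast; ring]
    rw [PySem.List.pyRange_one_append 0 (m : Int) ((m : Int) + 1)
      (Int.natCast_nonneg m) (le_of_lt (lt_add_one _))]
    rw [List.foldl_append, ih, hseg]
    show PySem.Int.bor ((2 ^ m - 1 : Int) <<< (1 : Nat)) 1 = 2 ^ (m + 1) - 1
    have h2 : (0 : Int) < 2 ^ m := by positivity
    rw [Int.shiftLeft_eq]
    rw [show ((2 ^ m - 1 : Int) * 2 ^ 1) = ((2 * (2 ^ m - 1) : Nat) : Int) by
      push_cast [Nat.one_le_two_pow]; ring]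
    rw [PySem.Int.bor_of_nonneg (Int.natCast_nonneg _) (by norm_num)]
    rw [Int.toNat_natCast, show ((1 : Int).toNat) = 1 from rfl, pv_or_one]
    push_cast [Nat.one_le_two_pow]
    ring

-- masking with 2^n - 1 is reduction modulo 2^n (Python semantics, also for negatives)
theorem pv_band_mask (a : Int) (n : Nat) :
    PySem.Int.band a ((2 : Int) ^ n - 1) = a % 2 ^ n := by
  have h2 : (0 : Int) < 2 ^ n := by positivity
  have hb : (0 : Int) ≤ 2 ^ n - 1 := by omega
  have htn : ((2 : Int) ^ n - 1).toNat = 2 ^ n - 1 := by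
    have : ((2 : Nat) ^ n : Int) = (2 : Int) ^ n := by push_cast; rfl
    omega
  unfold PySem.Int.band
  by_cases ha : 0 ≤ a
  · rw [if_pos ha, if_pos hb]
    rw [htn, Nat.and_two_pow_sub_one_eq_mod]
    have hta := Int.toNat_of_nonneg ha
    push_cast
    rw [hta]
  · rw [if_neg ha, if_pos hb]
    set m : Nat := (-a - 1).toNat with hm
    have ham : a = -(m : Int) - 1 := by omega
    have hmlt : m % 2 ^ n < 2 ^ n := Nat.mod_lt _ (by positivity)
    rw [htn, Nat.and_comm, Nat.and_two_pow_sub_one_eq_mod]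
    have hdvdn : 2 ^ n ∣ m - m % 2 ^ n := Nat.dvd_sub_mod m
    have hdvd : ((2 : Int) ^ n) ∣ ((m : Int) - (m % 2 ^ n : Nat)) := by
      have h := Int.natCast_dvd_natCast.mpr hdvdn
      rwa [Nat.cast_sub (Nat.mod_le _ _), Nat.cast_pow, Nat.cast_ofNat] at h
    have hgoal : (-(m : Int) - 1) % 2 ^ n = 2 ^ n - 1 - (m % 2 ^ n : Nat) := by
      have hrhs : ((2 : Int) ^ n - 1 - (m % 2 ^ n : Nat)) % 2 ^ n
          = 2 ^ n - 1 - (m % 2 ^ n : Nat) := by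
        apply Int.emod_eq_of_lt <;> push_cast <;> omega
      rw [← hrhs]
      rw [Int.emod_eq_emod_iff_emod_sub_eq_zero]
      apply Int.emod_eq_zero_of_dvd
      have : (-(m : Int) - 1) - (2 ^ n - 1 - (m % 2 ^ n : Nat))
          = -((m : Int) - (m % 2 ^ n : Nat)) - 2 ^ n := by ring
      rw [this]
      exact dvd_sub (dvd_neg.mpr hdvd) (dvd_refl _)
    rw [ham, hgoal]
    have hle : 1 + m % 2 ^ n ≤ 2 ^ n := by omega
    have hcast : (((2 ^ n - 1) - m % 2 ^ n : Nat) : Int)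
        = 2 ^ n - 1 - (m % 2 ^ n : Nat) := by
      push_cast [Nat.cast_sub (by omega : 1 ≤ 2 ^ n), Nat.cast_sub (by omega : m % 2 ^ n ≤ 2 ^ n - 1)]
      omega
    rw [hcast]

-- ===== VERDICT (by name: the statement is the Claim_ definition above) =====
theorem last_k_bits_match_spec : Claim_equal_last_k_bits_match := by
  intro x y k _
  unfold Spec_last_k_bits_match last_k_bits_match last_k_bits_match_alt
  by_cases hk0 : k = 0
  · simp [hk0]
  · rw [if_neg (by simpa using hk0)]
    by_cases hkneg : k ≤ 0
    · rw [if_pos hkneg, PySem.List.pyRange_one_eq_nil hkneg]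
      simp
    · rw [if_neg hkneg]
      rw [not_le] at hkneg
      obtain ⟨n, hn⟩ : ∃ n : Nat, k = (n : Int) := ⟨k.toNat, (Int.toNat_of_nonneg (le_of_lt hkneg)).symm⟩
      subst hn
      dsimp only
      rw [pv_mask_eq, pv_band_mask, pv_band_mask]
      have hM : (0 : Int) < 2 ^ n := by positivity
      rw [PySem.Int.mod_eq_emod_of_pos (by rw [Int.shiftLeft_eq]; simpa using hM)]
      rw [Int.shiftLeft_eq, one_mul, Int.toNat_natCast]
      have h : (x % 2 ^ n = y % 2 ^ n) ↔ (x - y) % 2 ^ n = 0 :=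
        Int.emod_eq_emod_iff_emod_sub_eq_zero
      rw [Bool.eq_iff_iff]
      simp only [beq_iff_eq]
      exact h
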